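-- pv_equiv track=rewrite | github.com/wesleyautomate-ship-it/Dubai-Real-Estate-GPT | database/scripts/backfill_bedrooms_by_stack.py | unit_stack
-- ===== SOURCE A (Python) =====
-- from typing import Dict, Optional, Tuple, List
--
-- def unit_stack(unit: Optional[str]) -> Optional[str]:
--     """Derive a stack pattern from unit (e.g., 1705 -> 05, 1203 -> 03)."""
--     if not unit:
--         return None
--     text = "".join(ch for ch in str(unit) if ch.isalnum()).upper()
--     digits = "".join(ch for ch in text if ch.isdigit())
--     if len(digits) >= 2:
--         return digits[-2:]  # last two digits as stack
--     return None
-- ===== SOURCE B (Python) =====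
-- from typing import Optional
--
--
-- def unit_stack(unit: Optional[str]) -> Optional[str]:
--     """Derive a stack pattern from unit (e.g., 1705 -> 05, 1203 -> 03)."""
--     if not unit:
--         return None
--     prev = None
--     for ch in reversed(str(unit)):
--         if ch.isdigit():
--             if prev is None:
--                 prev = ch
--             else:
--                 return ch + prev
--     return None
-- ===== Notes on version B (the rewrite author's own statement) =====
-- stated objective: alternative
-- what changed: Instead of building the full alnum-filtered uppercased string and then the full digit string and slicing its last two characters, B scans the string right-to-left, keeps at most one previously seen digit, and returns as soon as a second digit is found.
import Mathlib
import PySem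

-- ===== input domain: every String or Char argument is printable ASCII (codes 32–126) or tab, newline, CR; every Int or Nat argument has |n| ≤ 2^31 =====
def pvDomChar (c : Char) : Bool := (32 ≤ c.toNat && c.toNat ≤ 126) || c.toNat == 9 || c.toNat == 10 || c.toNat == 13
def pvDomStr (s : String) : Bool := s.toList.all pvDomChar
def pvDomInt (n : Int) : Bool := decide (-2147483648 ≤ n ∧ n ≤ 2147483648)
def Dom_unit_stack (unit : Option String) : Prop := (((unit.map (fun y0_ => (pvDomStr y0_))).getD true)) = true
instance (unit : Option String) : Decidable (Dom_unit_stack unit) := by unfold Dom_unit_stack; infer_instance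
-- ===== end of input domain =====

-- B replaces A's build-the-whole-digit-string-then-slice with a right-to-left scan that
-- remembers at most one digit and returns as soon as the second digit is seen (objective: alternative).

-- ===== PORT A =====
-- A: guard on falsy unit, keep alnum chars, uppercase, keep digits, return last two digits.
def unit_stack (unit : Option String) : Option String :=
  match unit with
  | none => none
  | some s =>
    if s.toList = [] then none        -- `if not unit` also catches the empty string
    else
      let text := PySem.Chars.upper (s.toList.filter PySem.Chars.isalnum)
      let digits := text.filter PySem.Chars.isdigit
      if 2 ≤ digits.length then
        some (String.ofList (PySem.List.slice digits (some (-2)) none))  -- digits[-2:]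
      else none

-- ===== PORT B =====
-- B's loop: walk the reversed characters carrying the last digit seen (if any);
-- on the second digit return it followed by the remembered one.
def unitStackScan : List Char → Option Char → Option String
  | [], _ => none
  | c :: rest, prev =>
    if PySem.Chars.isdigit c then
      match prev with
      | none => unitStackScan rest (some c)
      | some p => some (String.ofList [c, p])
    else unitStackScan rest prev

def unit_stack_alt (unit : Option String) : Option String :=
  match unit with
  | none => none
  | some s =>
    if s.toList = [] then none        -- same `if not unit` guard
    else unitStackScan s.toList.reverse none

-- ===== PRECONDITION & SPEC =====
def Spec_unit_stack (unit : Option String) (out : Option String) : Prop := out = unit_stack_alt unit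
instance (unit : Option String) (out : Option String) : Decidable (Spec_unit_stack unit out) := by unfold Spec_unit_stack; infer_instance

-- ===== CLAIM (what is proved, stated in full; the proofs are below) =====
def Claim_equal_unit_stack : Prop := ∀ (unit : Option String), Dom_unit_stack unit → Spec_unit_stack unit (unit_stack unit)

-- ===== LEMMAS AND PROOFS =====

theorem char_le_iff (a b : Char) : a ≤ b ↔ a.toNat ≤ b.toNat := by
  rw [Char.le_def]; exact UInt32.le_iff_toNat_le

theorem tn0 : '0'.toNat = 48 := rfl
theorem tn9 : '9'.toNat = 57 := rfl
theorem tna : 'a'.toNat = 97 := rfl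
theorem tnz : 'z'.toNat = 122 := rfl

theorem isdigit_not_islower (c : Char) (h : PySem.Chars.isdigit c = true) :
    PySem.Chars.islower c = false := by
  simp only [PySem.Chars.isdigit, PySem.Chars.islower, Bool.and_eq_true, decide_eq_true_eq,
    Bool.and_eq_false_iff, decide_eq_false_iff_not, char_le_iff, tn0, tn9, tna, tnz] at *
  omega

theorem isdigit_isalnum (c : Char) (h : PySem.Chars.isdigit c = true) :
    PySem.Chars.isalnum c = true := by
  simp [PySem.Chars.isalnum, h]

theorem upperChar_of_isdigit (c : Char) (h : PySem.Chars.isdigit c = true) :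
    PySem.Chars.upperChar c = c := by
  simp [PySem.Chars.upperChar, isdigit_not_islower c h]

theorem isdigit_upperChar (c : Char) (h : PySem.Chars.isdigit c = false) :
    PySem.Chars.isdigit (PySem.Chars.upperChar c) = false := by
  unfold PySem.Chars.upperChar
  split
  · next hl =>
    simp only [PySem.Chars.islower, Bool.and_eq_true, decide_eq_true_eq, char_le_iff,
      tna, tnz] at hl
    have ht : (Char.ofNat (c.toNat - 32)).toNat = c.toNat - 32 := by
      have hv : (c.toNat - 32).isValidChar := by left; omega
      unfold Char.ofNat
      rw [dif_pos hv]
      rfl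
    simp only [PySem.Chars.isdigit, Bool.and_eq_false_iff, decide_eq_false_iff_not,
      char_le_iff, tn0, tn9, ht]
    omega
  · exact h

/-- A's two filters and its uppercasing collapse to a single digit filter. -/
theorem digits_eq (cs : List Char) :
    (PySem.Chars.upper (cs.filter PySem.Chars.isalnum)).filter PySem.Chars.isdigit
      = cs.filter PySem.Chars.isdigit := by
  induction cs with
  | nil => rfl
  | cons c t ih =>
    by_cases hd : PySem.Chars.isdigit c = true
    · simp [isdigit_isalnum c hd, PySem.Chars.upper,
        upperChar_of_isdigit c hd, hd]
      simpa [PySem.Chars.upper] using ih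
    · have hd' : PySem.Chars.isdigit c = false := by simpa using hd
      by_cases ha : PySem.Chars.isalnum c = true
      · simp [ha, PySem.Chars.upper, isdigit_upperChar c hd', hd']
        simpa [PySem.Chars.upper] using ih
      · simp [ha, hd', ih]

theorem scan_some (l : List Char) (p : Char) :
    unitStackScan l (some p)
      = match (l.filter PySem.Chars.isdigit).head? with
        | some a => some (String.ofList [a, p])
        | none => none := by
  induction l with
  | nil => rfl
  | cons c t ih =>
    by_cases hd : PySem.Chars.isdigit c = true
    · simp [unitStackScan, hd]
    · have hd' : PySem.Chars.isdigit c = false := by simpa using hd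
      simp [unitStackScan, hd', ih]

theorem scan_none (l : List Char) :
    unitStackScan l none
      = match l.filter PySem.Chars.isdigit with
        | a :: b :: _ => some (String.ofList [b, a])
        | _ => none := by
  induction l with
  | nil => rfl
  | cons c t ih =>
    by_cases hd : PySem.Chars.isdigit c = true
    · rw [show unitStackScan (c :: t) none = unitStackScan t (some c) by simp [unitStackScan, hd]]
      rw [scan_some]
      cases ht : t.filter PySem.Chars.isdigit with
      | nil => simp [hd, ht]
      | cons b u => simp [hd, ht]
    · have hd' : PySem.Chars.isdigit c = false := by simpa using hd
      rw [show unitStackScan (c :: t) none = unitStackScan t none by simp [unitStackScan, hd']]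
      rw [ih]
      simp [hd']

-- ===== VERDICT (by name: the statement is the Claim_ definition above) =====
theorem unit_stack_spec : Claim_equal_unit_stack := by
  intro unit _
  unfold Spec_unit_stack
  cases unit with
  | none => rfl
  | some s =>
    simp only [unit_stack, unit_stack_alt]
    by_cases he : s.toList = []
    · simp [he]
    · simp only [he, if_false, digits_eq, List.filter_reverse, scan_none]
      cases hR : (s.toList.filter PySem.Chars.isdigit).reverse with
      | nil =>
        have hD : s.toList.filter PySem.Chars.isdigit = [] := by
          simpa using congrArg List.reverse hR
        simp [hD]
      | cons a tl =>
        cases tl with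
        | nil =>
          have hD : s.toList.filter PySem.Chars.isdigit = [a] := by
            simpa using congrArg List.reverse hR
          simp [hD]
        | cons b u =>
          have hD : s.toList.filter PySem.Chars.isdigit = u.reverse ++ [b, a] := by
            simpa using congrArg List.reverse hR
          rw [hD]
          have hlen : (u.reverse ++ [b, a]).length = u.length + 2 := by simp
          rw [if_pos (by omega)]
          rw [PySem.List.slice_from_neg_ofNat _ 2 (by omega)]
          simp
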